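-- pv_equiv track=rewrite | github.com/SyncfusionExamples/ej2-react-grid-samples | connecting-to-backends/syncfusion-react-grid-custom-binding-with-fastapi-server/server/routers/products.py | apply_sort
-- ===== SOURCE A (Python) =====
-- from typing import List, Dict, Any, Optional
--
-- def apply_sort(items: List[Dict], sorted_columns: Optional[List]) -> List[Dict]:
--     """Apply sorting based on column specifications."""
--     if not sorted_columns:
--         return items
--
--     sorted_items = items.copy()
--
--     # Sort in reverse order of columns (last column first) for stable multi-column sort
--     for sort_spec in reversed(sorted_columns):
--         field = sort_spec.get('name')
--         direction = sort_spec.get('direction', 'ascending')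
--
--         sorted_items = sorted(
--             sorted_items,
--             key=lambda x: x.get(field, ''),
--             reverse=(direction.lower() == 'descending')
--         )
--
--     return sorted_items
-- ===== SOURCE B (Python) =====
-- from typing import List, Dict, Optional
--
--
-- def apply_sort(items: List[Dict], sorted_columns: Optional[List]) -> List[Dict]:
--     """Apply sorting: one stable merge sort driven by a multi-column comparator."""
--     if not sorted_columns:
--         return items
--
--     def cmp(a, b):
--         for spec in sorted_columns:
--             field = spec.get('name')
--             va = a.get(field, '')
--             vb = b.get(field, '')
--             if va < vb:
--                 r = -1
--             elif va > vb:
--                 r = 1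
--             else:
--                 continue
--             direction = spec.get('direction', 'ascending')
--             return -r if direction.lower() == 'descending' else r
--         return 0
--
--     def merge(left, right):
--         out = []
--         i = j = 0
--         while i < len(left) and j < len(right):
--             if cmp(left[i], right[j]) <= 0:
--                 out.append(left[i])
--                 i += 1
--             else:
--                 out.append(right[j])
--                 j += 1
--         out.extend(left[i:])
--         out.extend(right[j:])
--         return out
--
--     def msort(lst):
--         if len(lst) <= 1:
--             return lst
--         mid = len(lst) // 2
--         return merge(msort(lst[:mid]), msort(lst[mid:]))
--
--     return msort(items)
-- ===== Notes on version B (the rewrite author's own statement) =====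
-- stated objective: alternative
-- what changed: Replaces the k repeated stable sorts over reversed column specs with a single hand-written stable merge sort driven by one lexicographic multi-column comparator.
import Mathlib
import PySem

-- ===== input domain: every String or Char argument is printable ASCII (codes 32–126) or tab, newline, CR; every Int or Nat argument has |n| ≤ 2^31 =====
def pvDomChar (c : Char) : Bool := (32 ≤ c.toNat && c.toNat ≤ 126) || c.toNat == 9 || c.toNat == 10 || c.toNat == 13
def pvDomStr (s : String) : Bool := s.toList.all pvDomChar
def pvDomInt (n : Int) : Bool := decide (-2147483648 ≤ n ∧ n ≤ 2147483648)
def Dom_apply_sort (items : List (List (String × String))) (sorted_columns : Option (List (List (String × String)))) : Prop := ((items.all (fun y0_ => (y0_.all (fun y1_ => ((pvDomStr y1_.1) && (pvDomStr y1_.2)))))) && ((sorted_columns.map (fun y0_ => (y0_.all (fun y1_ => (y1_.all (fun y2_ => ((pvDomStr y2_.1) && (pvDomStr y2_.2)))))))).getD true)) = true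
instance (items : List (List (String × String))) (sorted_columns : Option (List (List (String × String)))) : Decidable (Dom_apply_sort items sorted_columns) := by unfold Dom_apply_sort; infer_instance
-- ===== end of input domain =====

-- B replaces A's k repeated stable sorts (one per column, in reversed order) by a single
-- hand-written stable merge sort driven by one lexicographic multi-column comparator
-- (same cost class; 'alternative' objective). Return-value equivalence only: neither mutates.

-- ===== PORT A =====
-- x.get(field, '') where field = spec.get('name') (None key can never match a str-keyed row)
def keyOfSpec (spec : List (String × String)) (x : List (String × String)) : String :=
  match PySem.Dict.get? ⟨spec⟩ "name" with
  | none => ""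
  | some f => PySem.Dict.getD ⟨x⟩ f ""

-- direction.lower() == 'descending' with direction = spec.get('direction', 'ascending')
def isDescSpec (spec : List (String × String)) : Bool :=
  PySem.Str.lower (PySem.Dict.getD ⟨spec⟩ "direction" "ascending") == "descending"

def apply_sort (items : List (List (String × String))) (sorted_columns : Option (List (List (String × String)))) : List (List (String × String)) :=
  match sorted_columns with
  | none => items
  | some cols =>
    if cols.isEmpty then items
    else
      cols.reverse.foldl
        (fun sorted_items spec => PySem.List.sorted sorted_items (keyOfSpec spec) (isDescSpec spec))
        items

-- ===== PORT B =====
-- the comparator loop of Source B: first column whose two values differ decides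
def cmpCols (cols : List (List (String × String))) (a b : List (String × String)) : Int :=
  match cols with
  | [] => 0
  | spec :: rest =>
    let va : String := match PySem.Dict.get? ⟨spec⟩ "name" with
      | none => "" | some f => PySem.Dict.getD ⟨a⟩ f ""
    let vb : String := match PySem.Dict.get? ⟨spec⟩ "name" with
      | none => "" | some f => PySem.Dict.getD ⟨b⟩ f ""
    if va < vb then
      (if PySem.Str.lower (PySem.Dict.getD ⟨spec⟩ "direction" "ascending") == "descending" then 1 else -1)
    else if vb < va then
      (if PySem.Str.lower (PySem.Dict.getD ⟨spec⟩ "direction" "ascending") == "descending" then -1 else 1)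
    else cmpCols rest a b

-- Source B's merge: take left while cmp(left[i], right[j]) <= 0 (stable)
def mergeB (cmp : List (String × String) → List (String × String) → Int) :
    List (List (String × String)) → List (List (String × String)) → List (List (String × String))
  | [], r => r
  | a :: l, [] => a :: l
  | a :: l, b :: r =>
    if cmp a b ≤ 0 then a :: mergeB cmp l (b :: r) else b :: mergeB cmp (a :: l) r
termination_by l r => l.length + r.length

-- Source B's msort: split at len//2
def msortB (cmp : List (String × String) → List (String × String) → Int)
    (lst : List (List (String × String))) : List (List (String × String)) :=
  if lst.length ≤ 1 then lst
  else mergeB cmp (msortB cmp (lst.take (lst.length / 2))) (msortB cmp (lst.drop (lst.length / 2)))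
termination_by lst.length
decreasing_by
  · simp only [List.length_take]; omega
  · simp only [List.length_drop]; omega

def apply_sort_alt (items : List (List (String × String))) (sorted_columns : Option (List (List (String × String)))) : List (List (String × String)) :=
  match sorted_columns with
  | none => items
  | some cols => if cols.isEmpty then items else msortB (cmpCols cols) items

-- ===== PRECONDITION & SPEC =====
def Spec_apply_sort (items : List (List (String × String))) (sorted_columns : Option (List (List (String × String)))) (out : List (List (String × String))) : Prop := out = apply_sort_alt items sorted_columns
instance (items : List (List (String × String))) (sorted_columns : Option (List (List (String × String)))) (out : List (List (String × String))) : Decidable (Spec_apply_sort items sorted_columns out) := by unfold Spec_apply_sort; infer_instance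

-- ===== CLAIM (what is proved, stated in full; the proofs are below) =====
def Claim_equal_apply_sort : Prop := ∀ (items : List (List (String × String))) (sorted_columns : Option (List (List (String × String)))), Dom_apply_sort items sorted_columns → Spec_apply_sort items sorted_columns (apply_sort items sorted_columns)

-- ===== LEMMAS AND PROOFS =====

-- strict weak order packaged as explicit Prop fields (no typeclass)
structure SWO {α : Type} (lt : α → α → Bool) : Prop where
  tr : ∀ a b c, lt a b = true → lt b c = true → lt a c = true
  ntr : ∀ a b c, lt a b = false → lt b c = false → lt a c = false
  asym : ∀ a b, lt a b = true → lt b a = false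

-- A's per-pass strict order (insertBy's `before` for that pass)
def ltS (spec : List (String × String)) (a b : List (String × String)) : Bool :=
  if isDescSpec spec then decide (keyOfSpec spec b < keyOfSpec spec a)
  else decide (keyOfSpec spec a < keyOfSpec spec b)

-- B's overall strict order
def ltB (cols : List (List (String × String))) (a b : List (String × String)) : Bool :=
  decide (cmpCols cols a b < 0)

-- ordering on index-decorated elements: strictly less, or tied and originally earlier
def Comb {α : Type} (lt : α → α → Bool) (M : Int × α → Int × α → Prop) (d e : Int × α) : Prop :=
  lt d.2 e.2 = true ∨ (lt d.2 e.2 = false ∧ lt e.2 d.2 = false ∧ M d e)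

def Tdec {α : Type} (lt : α → α → Bool) (d e : Int × α) : Prop :=
  Comb lt (fun d e => d.1 < e.1) d e

-- decorated insertion pass / merge sort
def insD {α : Type} (lt : α → α → Bool) (d : Int × α) (acc : List (Int × α)) : List (Int × α) :=
  PySem.List.insertBy (fun x y => lt x.2 y.2) d acc

def passD {α : Type} (lt : α → α → Bool) (ds : List (Int × α)) : List (Int × α) :=
  ds.foldl (fun acc d => insD lt d acc) []

def mrgD {α : Type} (lt : α → α → Bool) : List (Int × α) → List (Int × α) → List (Int × α)
  | [], r => r
  | d :: l, [] => d :: l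
  | d :: l, e :: r =>
    if lt e.2 d.2 then e :: mrgD lt (d :: l) r else d :: mrgD lt l (e :: r)
termination_by l r => l.length + r.length

def msrtD {α : Type} (lt : α → α → Bool) (ds : List (Int × α)) : List (Int × α) :=
  if ds.length ≤ 1 then ds
  else mrgD lt (msrtD lt (ds.take (ds.length / 2))) (msrtD lt (ds.drop (ds.length / 2)))
termination_by ds.length
decreasing_by
  · simp only [List.length_take]; omega
  · simp only [List.length_drop]; omega

theorem swo_ltS (spec : List (String × String)) : SWO (ltS spec) := by
  refine ⟨?_, ?_, ?_⟩ <;> intro a b <;> unfold ltS <;> split_ifs <;>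
      simp only [decide_eq_true_eq, decide_eq_false_iff_not]
  · intro c hab hbc; exact lt_trans hbc hab
  · intro c hab hbc; exact lt_trans hab hbc
  · intro c hab hbc h; exact hbc (lt_of_lt_of_le h (not_lt.mp hab))
  · intro c hab hbc h; exact hbc (lt_of_le_of_lt (not_lt.mp hab) h)
  · exact fun h => not_lt_of_gt h
  · exact fun h => not_lt_of_gt h

theorem cmp_cons (spec : List (String × String)) (rest : List (List (String × String)))
    (a b : List (String × String)) :
    cmpCols (spec :: rest) a b =
      if ltS spec a b then -1 else if ltS spec b a then 1 else cmpCols rest a b := by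
  have hL : cmpCols (spec :: rest) a b =
      (if keyOfSpec spec a < keyOfSpec spec b then (if isDescSpec spec then 1 else -1)
       else if keyOfSpec spec b < keyOfSpec spec a then (if isDescSpec spec then -1 else 1)
       else cmpCols rest a b) := by
    cases hf : PySem.Dict.get? ⟨spec⟩ "name" <;>
      simp only [cmpCols, keyOfSpec, isDescSpec, hf] <;> rfl
  rw [hL]
  by_cases hD : isDescSpec spec <;>
    rcases lt_trichotomy (keyOfSpec spec a) (keyOfSpec spec b) with h | h | h <;>
      simp [ltS, hD, h, not_lt_of_gt]

theorem cmp_antisym (cols : List (List (String × String))) (a b : List (String × String)) :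
    cmpCols cols a b = - cmpCols cols b a := by
  induction cols with
  | nil => rfl
  | cons spec rest ih =>
    rw [cmp_cons, cmp_cons]
    by_cases h1 : ltS spec a b
    · simp [h1, (swo_ltS spec).asym _ _ h1]
    · by_cases h2 : ltS spec b a
      · simp [h1, h2]
      · simp [h1, h2, ih]

theorem cmp_cons_lt_iff (spec : List (String × String)) (rest : List (List (String × String)))
    (a b : List (String × String)) :
    cmpCols (spec :: rest) a b < 0 ↔
      (ltS spec a b = true ∨ (ltS spec a b = false ∧ ltS spec b a = false ∧ cmpCols rest a b < 0)) := by
  rw [cmp_cons]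
  by_cases h1 : ltS spec a b <;> by_cases h2 : ltS spec b a <;> simp [h1, h2]

theorem cmp_cons_le_iff (spec : List (String × String)) (rest : List (List (String × String)))
    (a b : List (String × String)) :
    cmpCols (spec :: rest) a b ≤ 0 ↔
      (ltS spec a b = true ∨ (ltS spec a b = false ∧ ltS spec b a = false ∧ cmpCols rest a b ≤ 0)) := by
  rw [cmp_cons]
  by_cases h1 : ltS spec a b <;> by_cases h2 : ltS spec b a <;> simp [h1, h2]

theorem cmp_lt_trans (cols : List (List (String × String))) (a b c : List (String × String))
    (h1 : cmpCols cols a b < 0) (h2 : cmpCols cols b c < 0) : cmpCols cols a c < 0 := by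
  induction cols generalizing a b c with
  | nil => simp [cmpCols] at h1
  | cons spec rest ih =>
    have S := swo_ltS spec
    rw [cmp_cons_lt_iff] at h1 h2 ⊢
    rcases h1 with hS | ⟨hab, hba, hr⟩ <;> rcases h2 with hS' | ⟨hbc, hcb, hr'⟩
    · exact Or.inl (S.tr _ _ _ hS hS')
    · left; by_contra hac
      exact absurd (S.ntr _ _ _ (Bool.not_eq_true _ ▸ hac) hcb) (by simp [hS])
    · left; by_contra hac
      exact absurd (S.ntr _ _ _ hba (Bool.not_eq_true _ ▸ hac)) (by simp [hS'])
    · exact Or.inr ⟨S.ntr _ _ _ hab hbc, S.ntr _ _ _ hcb hba, ih _ _ _ hr hr'⟩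

theorem cmp_le_trans (cols : List (List (String × String))) (a b c : List (String × String))
    (h1 : cmpCols cols a b ≤ 0) (h2 : cmpCols cols b c ≤ 0) : cmpCols cols a c ≤ 0 := by
  induction cols generalizing a b c with
  | nil => simp [cmpCols]
  | cons spec rest ih =>
    have S := swo_ltS spec
    rw [cmp_cons_le_iff] at h1 h2 ⊢
    rcases h1 with hS | ⟨hab, hba, hr⟩ <;> rcases h2 with hS' | ⟨hbc, hcb, hr'⟩
    · exact Or.inl (S.tr _ _ _ hS hS')
    · left; by_contra hac
      exact absurd (S.ntr _ _ _ (Bool.not_eq_true _ ▸ hac) hcb) (by simp [hS])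
    · left; by_contra hac
      exact absurd (S.ntr _ _ _ hba (Bool.not_eq_true _ ▸ hac)) (by simp [hS'])
    · exact Or.inr ⟨S.ntr _ _ _ hab hbc, S.ntr _ _ _ hcb hba, ih _ _ _ hr hr'⟩

theorem swo_ltB (cols : List (List (String × String))) : SWO (ltB cols) := by
  refine ⟨?_, ?_, ?_⟩ <;> intro a b <;> simp only [ltB, decide_eq_true_eq, decide_eq_false_iff_not]
  · intro c h1 h2; exact cmp_lt_trans cols a b c h1 h2
  · intro c h1 h2
    have hba : cmpCols cols b a ≤ 0 := by have := cmp_antisym cols a b; omega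
    have hcb : cmpCols cols c b ≤ 0 := by have := cmp_antisym cols b c; omega
    have := cmp_le_trans cols c b a hcb hba
    have := cmp_antisym cols a c; omega
  · intro h1; have := cmp_antisym cols a b; omega

theorem enum_map_snd {α : Type} (xs : List α) (s : Int) :
    (PySem.List.enumerate xs s).map Prod.snd = xs := by
  induction xs generalizing s <;> simp [PySem.List.enumerate, *]

-- insertion side
theorem insD_map {α : Type} (lt : α → α → Bool) (d : Int × α) (acc : List (Int × α)) :
    (insD lt d acc).map Prod.snd = PySem.List.insertBy lt d.2 (acc.map Prod.snd) := by
  induction acc with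
  | nil => rfl
  | cons y t ih =>
    show (if lt d.2 y.2 then _ else _ : List (Int × α)).map Prod.snd = _
    by_cases h : lt d.2 y.2 <;> simp [h, PySem.List.insertBy, insD] at ih ⊢ <;> exact ih

theorem passD_map {α : Type} (lt : α → α → Bool) (ds : List (Int × α)) (acc : List (Int × α)) :
    (ds.foldl (fun acc d => insD lt d acc) acc).map Prod.snd =
      (ds.map Prod.snd).foldl (fun acc x => PySem.List.insertBy lt x acc) (acc.map Prod.snd) := by
  induction ds generalizing acc with
  | nil => rfl
  | cons d t ih => simp only [List.foldl_cons, List.map_cons, ih, insD_map]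

theorem insD_perm {α : Type} (lt : α → α → Bool) (d : Int × α) (acc : List (Int × α)) :
    (insD lt d acc).Perm (d :: acc) := by
  induction acc with
  | nil => exact List.Perm.refl _
  | cons y t ih =>
    show (if lt d.2 y.2 then _ else _ : List (Int × α)).Perm _
    by_cases h : lt d.2 y.2
    · simp [h]
    · simp only [h, if_neg, Bool.false_eq_true, not_false_iff]
      exact (ih.cons y).trans (List.Perm.swap d y t)

theorem foldl_insD_perm {α : Type} (lt : α → α → Bool) (ds acc : List (Int × α)) :
    (ds.foldl (fun acc d => insD lt d acc) acc).Perm (ds ++ acc) := by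
  induction ds generalizing acc with
  | nil => simp
  | cons d t ih =>
    simp only [List.foldl_cons, List.cons_append]
    exact ((ih _).trans ((insD_perm lt d acc).append_left t)).trans
      (List.perm_middle)

theorem insD_pairwise {α : Type} {lt : α → α → Bool} (h : SWO lt)
    (M : Int × α → Int × α → Prop) (d : Int × α) (acc : List (Int × α))
    (hacc : acc.Pairwise (Comb lt M)) (hM : ∀ x ∈ acc, M x d) :
    (insD lt d acc).Pairwise (Comb lt M) := by
  induction acc with
  | nil => simp [insD, PySem.List.insertBy]
  | cons y t ih =>
    rcases List.pairwise_cons.mp hacc with ⟨hy, ht⟩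
    show ((if lt d.2 y.2 then _ else _ : List (Int × α))).Pairwise (Comb lt M)
    by_cases hdy : lt d.2 y.2
    · simp only [hdy, if_pos]
      refine List.pairwise_cons.mpr ⟨?_, hacc⟩
      intro z hz
      rcases List.mem_cons.mp hz with rfl | hzt
      · exact Or.inl hdy
      · rcases hy z hzt with hyz | ⟨hyz, hzy, hMyz⟩
        · exact Or.inl (h.tr _ _ _ hdy hyz)
        · left
          by_contra hdz
          exact absurd (h.ntr _ _ _ (Bool.not_eq_true _ ▸ hdz) hzy) (by simp [hdy])
    · simp only [hdy, if_neg, Bool.false_eq_true, not_false_iff]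
      refine List.pairwise_cons.mpr ⟨?_, ih ht (fun x hx => hM x (List.mem_cons_of_mem y hx))⟩
      intro z hz
      have hz' : z ∈ d :: t := (insD_perm lt d t).mem_iff.mp hz
      rcases List.mem_cons.mp hz' with rfl | hzt
      · by_cases hyd : lt y.2 z.2
        · exact Or.inl hyd
        · exact Or.inr ⟨Bool.not_eq_true _ ▸ hyd, Bool.not_eq_true _ ▸ hdy,
            hM y (List.mem_cons_self)⟩
      · exact hy z hzt

theorem passD_pairwise {α : Type} {lt : α → α → Bool} (h : SWO lt)
    (M : Int × α → Int × α → Prop) (ds acc : List (Int × α))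
    (hds : ds.Pairwise M) (hacc : acc.Pairwise (Comb lt M))
    (hcross : ∀ x ∈ acc, ∀ e ∈ ds, M x e) :
    (ds.foldl (fun acc d => insD lt d acc) acc).Pairwise (Comb lt M) := by
  induction ds generalizing acc with
  | nil => exact hacc
  | cons d t ih =>
    rcases List.pairwise_cons.mp hds with ⟨hd, ht⟩
    refine ih _ ht (insD_pairwise h M d acc hacc
      (fun x hx => hcross x hx d List.mem_cons_self)) ?_
    intro x hx e he
    rcases List.mem_cons.mp ((insD_perm lt d acc).mem_iff.mp hx) with rfl | hxa
    · exact hd e he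
    · exact hcross x hxa e (List.mem_cons_of_mem d he)

-- merge side
theorem mrgD_perm {α : Type} (lt : α → α → Bool) (l r : List (Int × α)) :
    (mrgD lt l r).Perm (l ++ r) := by
  fun_induction mrgD lt l r with
  | case1 r => exact List.Perm.refl _
  | case2 d l => simp
  | case3 d l e r hlt ih => exact ((ih.cons e).trans List.perm_middle.symm)
  | case4 d l e r hlt ih => exact ih.cons d

theorem mrgD_pairwise {α : Type} {lt : α → α → Bool} (h : SWO lt) (l r : List (Int × α))
    (hl : l.Pairwise (Tdec lt)) (hr : r.Pairwise (Tdec lt))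
    (hcross : ∀ d ∈ l, ∀ e ∈ r, d.1 < e.1) :
    (mrgD lt l r).Pairwise (Tdec lt) := by
  fun_induction mrgD lt l r with
  | case1 r => exact hr
  | case2 d l => exact hl
  | case3 d l e r hlt ih =>
    rcases List.pairwise_cons.mp hr with ⟨he, hr'⟩
    refine List.pairwise_cons.mpr ⟨?_, ih hl hr' (fun a ha b hb => hcross a ha b (List.mem_cons_of_mem e hb))⟩
    intro x hx
    have hx' : x ∈ (d :: l) ++ r := (mrgD_perm lt (d :: l) r).mem_iff.mp hx
    rcases List.mem_append.mp hx' with hxl | hxr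
    · rcases List.pairwise_cons.mp hl with ⟨hd, _⟩
      rcases List.mem_cons.mp hxl with rfl | hxl'
      · exact Or.inl hlt
      · rcases hd x hxl' with hdx | ⟨hdx, hxd, _⟩
        · exact Or.inl (h.tr _ _ _ hlt hdx)
        · left
          by_contra hex
          exact absurd (h.ntr _ _ _ (Bool.not_eq_true _ ▸ hex) hxd) (by simp [hlt])
    · exact he x hxr
  | case4 d l e r hlt0 ih =>
    have hlt : lt e.2 d.2 = false := by simpa using hlt0
    rcases List.pairwise_cons.mp hl with ⟨hd, hl'⟩
    refine List.pairwise_cons.mpr ⟨?_, ih hl' hr (fun a ha b hb => hcross a (List.mem_cons_of_mem d ha) b hb)⟩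
    intro x hx
    have hx' : x ∈ l ++ (e :: r) := (mrgD_perm lt l (e :: r)).mem_iff.mp hx
    rcases List.mem_append.mp hx' with hxl | hxr
    · exact hd x hxl
    · -- x is in the untaken right part; first show lt x.2 d.2 = false
      have hxd : lt x.2 d.2 = false := by
        rcases List.mem_cons.mp hxr with rfl | hxr'
        · exact hlt
        · rcases List.pairwise_cons.mp hr with ⟨he, _⟩
          rcases he x hxr' with hex | ⟨hex, hxe, _⟩
          · by_contra hxd
            exact absurd (h.tr _ _ _ hex (Bool.not_eq_false _ ▸ hxd)) (by simp [hlt])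
          · exact h.ntr _ _ _ hxe hlt
      by_cases hdx : lt d.2 x.2
      · exact Or.inl hdx
      · exact Or.inr ⟨Bool.not_eq_true _ ▸ hdx, hxd, hcross d List.mem_cons_self x hxr⟩

theorem msrtD_perm {α : Type} (lt : α → α → Bool) (ds : List (Int × α)) :
    (msrtD lt ds).Perm ds := by
  fun_induction msrtD lt ds with
  | case1 ds h => exact List.Perm.refl _
  | case2 ds h ih1 ih2 =>
    exact ((mrgD_perm lt _ _).trans (ih1.append ih2)).trans
      (by rw [List.take_append_drop])

theorem msrtD_pairwise {α : Type} {lt : α → α → Bool} (h : SWO lt) (ds : List (Int × α))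
    (hds : ds.Pairwise (fun d e => d.1 < e.1)) :
    (msrtD lt ds).Pairwise (Tdec lt) := by
  fun_induction msrtD lt ds with
  | case1 ds hlen =>
    match ds, hlen with
    | [], _ => exact List.Pairwise.nil
    | [x], _ => exact List.pairwise_singleton _ _
  | case2 ds hlen ih1 ih2 =>
    have hsplit := (List.take_append_drop (ds.length / 2) ds).symm ▸ hds
    rcases List.pairwise_append.mp hsplit with ⟨ht, hd, hcr⟩
    refine mrgD_pairwise h _ _ (ih1 ht) (ih2 hd) ?_
    intro a ha b hb
    exact hcr a ((msrtD_perm lt _).mem_iff.mp ha) b ((msrtD_perm lt _).mem_iff.mp hb)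

theorem mrgD_map (lt : List (String × String) → List (String × String) → Bool)
    (cmp : List (String × String) → List (String × String) → Int)
    (hc : ∀ a b, (cmp a b ≤ 0) ↔ lt b a = false) (l r : List (Int × List (String × String))) :
    (mrgD lt l r).map Prod.snd = mergeB cmp (l.map Prod.snd) (r.map Prod.snd) := by
  fun_induction mrgD lt l r with
  | case1 r => cases r <;> simp [mergeB]
  | case2 d l => simp [mergeB]
  | case3 d l e r hlt ih =>
    have hc' : ¬ (cmp d.2 e.2 ≤ 0) := by
      intro hle; exact absurd ((hc _ _).mp hle) (by simp [hlt])
    rw [mergeB.eq_def]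
    simp only [List.map_cons, if_neg hc', ih]
  | case4 d l e r hlt ih =>
    have hlt' : lt e.2 d.2 = false := by simpa using hlt
    have hc' : cmp d.2 e.2 ≤ 0 := (hc _ _).mpr hlt'
    rw [mergeB.eq_def]
    simp only [List.map_cons, if_pos hc', ih]

theorem msrtD_map (lt : List (String × String) → List (String × String) → Bool)
    (cmp : List (String × String) → List (String × String) → Int)
    (hc : ∀ a b, (cmp a b ≤ 0) ↔ lt b a = false) (ds : List (Int × List (String × String))) :
    (msrtD lt ds).map Prod.snd = msortB cmp (ds.map Prod.snd) := by
  fun_induction msrtD lt ds with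
  | case1 ds hlen =>
    rw [msortB]
    simp [List.length_map, hlen]
  | case2 ds hlen ih1 ih2 =>
    rw [msortB]
    simp only [List.length_map, if_neg hlen]
    rw [mrgD_map lt cmp hc, ih1, ih2, List.map_take, List.map_drop]

-- uniqueness
theorem tdec_antisymm {α : Type} {lt : α → α → Bool} (h : SWO lt) (d e : Int × α)
    (h1 : Tdec lt d e) (h2 : Tdec lt e d) : d = e := by
  exfalso
  rcases h1 with h1 | ⟨ha, hb, hi⟩ <;> rcases h2 with h2 | ⟨hc, hd', hj⟩
  · exact absurd (h.asym _ _ h1) (by simp [h2])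
  · exact absurd h1 (by simp [hd'])
  · exact absurd h2 (by simp [hb])
  · omega

-- A's pass, as a fold of insertBy over the pass's strict order
theorem pass_eq (spec : List (String × String)) (acc : List (List (String × String))) :
    PySem.List.sorted acc (keyOfSpec spec) (isDescSpec spec) =
      acc.foldl (fun a x => PySem.List.insertBy (ltS spec) x a) [] := by
  cases hd : isDescSpec spec
  · have hfn : ltS spec = fun a b => decide (keyOfSpec spec a < keyOfSpec spec b) := by
      funext a b; simp [ltS, hd]
    rw [hfn, ← PySem.List.sorted_eq_foldl_insertBy]
  · have hfn : ltS spec = fun a b => decide (keyOfSpec spec b < keyOfSpec spec a) := by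
      funext a b; simp [ltS, hd]
    rw [hfn, ← PySem.List.sorted_rev_eq_foldl_insertBy]

-- undecoration of the whole pass sequence
theorem A_map (l : List (List (String × String))) (ds : List (Int × List (String × String))) :
    (l.foldl (fun ds spec => passD (ltS spec) ds) ds).map Prod.snd =
      l.foldl (fun acc spec => PySem.List.sorted acc (keyOfSpec spec) (isDescSpec spec))
        (ds.map Prod.snd) := by
  induction l generalizing ds with
  | nil => rfl
  | cons spec t ih =>
    simp only [List.foldl_cons, ih, pass_eq]
    congr 1
    have := passD_map (ltS spec) ds []
    simpa [passD] using this

-- one decorated pass turns the invariant for `rest` into the invariant for `spec :: rest`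
theorem comb_step (spec : List (String × String)) (rest : List (List (String × String)))
    (d e : Int × List (String × String))
    (h : Comb (ltS spec) (Tdec (ltB rest)) d e) : Tdec (ltB (spec :: rest)) d e := by
  rcases h with hS | ⟨hab, hba, hT⟩
  · left
    simp only [ltB, decide_eq_true_eq, cmp_cons_lt_iff]
    exact Or.inl hS
  · rcases hT with hr | ⟨hra, hrb, hi⟩
    · left
      simp only [ltB, decide_eq_true_eq, cmp_cons_lt_iff] at hr ⊢
      exact Or.inr ⟨hab, hba, hr⟩
    · right
      simp only [ltB, decide_eq_false_iff_not, cmp_cons_lt_iff] at hra hrb ⊢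
      refine ⟨?_, ?_, hi⟩
      · rintro (h | ⟨_, _, h⟩)
        · exact absurd h (by simp [hab])
        · exact hra h
      · rintro (h | ⟨_, _, h⟩)
        · exact absurd h (by simp [hba])
        · exact hrb h

-- the invariant carried through A's reversed-column loop
theorem A_inv (cols : List (List (String × String))) (items : List (List (String × String))) :
    (cols.reverse.foldl (fun ds spec => passD (ltS spec) ds)
        (PySem.List.enumerate items 0)).Perm (PySem.List.enumerate items 0) ∧
      (cols.reverse.foldl (fun ds spec => passD (ltS spec) ds)
        (PySem.List.enumerate items 0)).Pairwise (Tdec (ltB cols)) := by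
  induction cols with
  | nil =>
    refine ⟨List.Perm.refl _, ?_⟩
    refine (PySem.List.pairwise_lt_enumerate items 0).imp ?_
    intro d e hi
    exact Or.inr ⟨by simp [ltB, cmpCols], by simp [ltB, cmpCols], hi⟩
  | cons spec rest ih =>
    have hrw : (spec :: rest).reverse = rest.reverse ++ [spec] := by simp
    rw [hrw, List.foldl_append]
    simp only [List.foldl_cons, List.foldl_nil]
    rcases ih with ⟨hperm, hpw⟩
    constructor
    · exact ((foldl_insD_perm (ltS spec) _ []).trans (by simp)).trans hperm
    · have := passD_pairwise (swo_ltS spec) (Tdec (ltB rest)) _ [] hpw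
        List.Pairwise.nil (by intro x hx; simp at hx)
      exact (this.imp (comb_step spec rest _ _))

-- ===== VERDICT (by name: the statement is the Claim_ definition above) =====
theorem apply_sort_spec : Claim_equal_apply_sort := by
  intro items sc _
  unfold Spec_apply_sort apply_sort apply_sort_alt
  cases sc with
  | none => rfl
  | some cols =>
    by_cases hE : cols.isEmpty
    · simp [hE]
    · simp only [hE, if_neg, Bool.false_eq_true, not_false_iff]
      -- A's side as the undecorated decorated fold
      have hA : cols.reverse.foldl
            (fun sorted_items spec =>
              PySem.List.sorted sorted_items (keyOfSpec spec) (isDescSpec spec)) items =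
          (cols.reverse.foldl (fun ds spec => passD (ltS spec) ds)
            (PySem.List.enumerate items 0)).map Prod.snd := by
        rw [A_map, enum_map_snd]
      -- B's side as the undecorated decorated merge sort
      have hc : ∀ a b, (cmpCols cols a b ≤ 0) ↔ ltB cols b a = false := by
        intro a b
        have := cmp_antisym cols a b
        simp only [ltB, decide_eq_false_iff_not]
        omega
      have hB : msortB (cmpCols cols) items =
          (msrtD (ltB cols) (PySem.List.enumerate items 0)).map Prod.snd := by
        rw [msrtD_map (ltB cols) (cmpCols cols) hc, enum_map_snd]
      rw [hA, hB]
      congr 1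
      rcases A_inv cols items with ⟨hp1, hw1⟩
      have hp2 := msrtD_perm (ltB cols) (PySem.List.enumerate items 0)
      have hw2 := msrtD_pairwise (swo_ltB cols) (PySem.List.enumerate items 0)
        (PySem.List.pairwise_lt_enumerate items 0)
      exact List.Perm.eq_of_pairwise
        (fun d e _ _ h1 h2 => tdec_antisymm (swo_ltB cols) d e h1 h2)
        hw1 hw2 (hp1.trans hp2.symm)
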